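-- pv_equiv track=rewrite | github.com/tranductri2003/competitive_programming | CODEFORCES/Contest/Codeforces Round #794 (Div. 2)/C_Circular_Local_MiniMax.py | check
-- ===== SOURCE A (Python) =====
-- def check(a,n):
--     for i in range(1,n-1):
--         if a[i-1]>a[i] <a[i+1] or a[i+1]<a[i]>a[i-1]:
--             pass
--         else:
--             return False
--     if a[-1]<a[0]>a[1] or a[-1]>a[0]<a[1]:
--         pass
--     else:
--         return False
--     if a[-2]<a[-1]>a[0] or a[-2]>a[-1]<a[0]:
--         pass
--     else:
--         return False
--     return True
-- ===== SOURCE B (Python) =====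
-- def check(a, n):
--     def sign(x):
--         return (x > 0) - (x < 0)
--     # difference signs: around the wrap (last pair, wrap pair, first pair), then the interior pairs
--     s = [sign(a[-1] - a[-2]), sign(a[0] - a[-1]), sign(a[1] - a[0])]
--     s += [sign(a[i] - a[i - 1]) for i in range(2, n)]
--     return all(s) and all(s[i] != s[i - 1] for i in range(1, len(s)))
-- ===== Notes on version B (the rewrite author's own statement) =====
-- stated objective: alternative
-- what changed: B builds the difference-sign sequence of the consulted pairs (the three signs around the wrap-around read with Python negative indexing, then the interior consecutive-pair signs for range(2, n)) and checks that all signs are nonzero and adjacent signs alternate, instead of A's per-index three-way local-extremum tests with separate boundary special cases; Pre_ requires 2 <= len(a) and n <= len(a), outside which B raises IndexError and A raises too unless a data-dependent short-circuit returns False first.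
-- outside the precondition, e.g. on check([1, 1, 1], 5): A returns False, B raises IndexError; on check([2, 2, 5], 9): A returns False, B raises IndexError
import Mathlib
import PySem

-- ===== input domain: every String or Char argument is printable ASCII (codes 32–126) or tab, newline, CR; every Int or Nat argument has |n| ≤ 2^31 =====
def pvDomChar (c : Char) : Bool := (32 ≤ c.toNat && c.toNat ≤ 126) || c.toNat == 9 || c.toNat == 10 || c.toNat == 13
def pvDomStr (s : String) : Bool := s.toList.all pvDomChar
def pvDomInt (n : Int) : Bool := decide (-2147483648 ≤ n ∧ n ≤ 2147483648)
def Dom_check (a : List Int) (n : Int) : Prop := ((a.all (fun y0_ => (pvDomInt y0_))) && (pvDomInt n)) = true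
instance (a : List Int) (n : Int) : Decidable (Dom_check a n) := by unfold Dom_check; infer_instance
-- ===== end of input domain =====

-- B builds the difference-sign sequence of the consulted pairs (the three signs around the
-- wrap-around, read with Python negative indexing, then the interior consecutive-pair signs)
-- and checks it is nonzero and alternating, instead of A's per-index local-extremum tests;
-- same O(n) cost, a different decomposition.


-- ===== PORT A =====
-- indexing uses pyGetD with default 0: under Pre_check (2 ≤ len(a), n ≤ len(a)) every index
-- Python actually evaluates is in range, so this is exact there.
-- the for-loop 'for i in range(1, n-1): if cond: pass else: return False' as structural
-- recursion on the remaining iterations, short-circuiting on the first failing index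
def checkLoop (a : List Int) (n : Int) (i : Int) : Bool :=
  if h : i < n - 1 then
    if (decide (PySem.List.pyGetD a (i - 1) 0 > PySem.List.pyGetD a i 0) &&
        decide (PySem.List.pyGetD a i 0 < PySem.List.pyGetD a (i + 1) 0)) ||
       (decide (PySem.List.pyGetD a (i + 1) 0 < PySem.List.pyGetD a i 0) &&
        decide (PySem.List.pyGetD a i 0 > PySem.List.pyGetD a (i - 1) 0)) then
      checkLoop a n (i + 1)
    else false
  else true
termination_by (n - 1 - i).toNat
decreasing_by omega

def check (a : List Int) (n : Int) : Bool :=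
  if checkLoop a n 1 then
    if (decide (PySem.List.pyGetD a (-1) 0 < PySem.List.pyGetD a 0 0) &&
        decide (PySem.List.pyGetD a 0 0 > PySem.List.pyGetD a 1 0)) ||
       (decide (PySem.List.pyGetD a (-1) 0 > PySem.List.pyGetD a 0 0) &&
        decide (PySem.List.pyGetD a 0 0 < PySem.List.pyGetD a 1 0)) then
      if (decide (PySem.List.pyGetD a (-2) 0 < PySem.List.pyGetD a (-1) 0) &&
          decide (PySem.List.pyGetD a (-1) 0 > PySem.List.pyGetD a 0 0)) ||
         (decide (PySem.List.pyGetD a (-2) 0 > PySem.List.pyGetD a (-1) 0) &&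
          decide (PySem.List.pyGetD a (-1) 0 < PySem.List.pyGetD a 0 0)) then
        true
      else false
    else false
  else false

-- ===== PORT B =====
-- sign x = (x > 0) - (x < 0), B's helper
def sign (x : Int) : Int := (if x > 0 then (1 : Int) else 0) - (if x < 0 then (1 : Int) else 0)

def check_alt (a : List Int) (n : Int) : Bool :=
  let s : List Int :=
    [sign (PySem.List.pyGetD a (-1) 0 - PySem.List.pyGetD a (-2) 0),
     sign (PySem.List.pyGetD a 0 0 - PySem.List.pyGetD a (-1) 0),
     sign (PySem.List.pyGetD a 1 0 - PySem.List.pyGetD a 0 0)] ++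
    (PySem.List.pyRange 2 n 1).map (fun i =>
      sign (PySem.List.pyGetD a i 0 - PySem.List.pyGetD a (i - 1) 0))
  s.all (fun x => decide (x ≠ 0)) &&
  (PySem.List.pyRange 1 (PySem.List.len s) 1).all (fun i =>
    decide (PySem.List.pyGetD s i 0 ≠ PySem.List.pyGetD s (i - 1) 0))

-- ===== PRECONDITION & SPEC =====
-- Pre_ requires 2 ≤ len(a) and n ≤ len(a): outside it B raises IndexError (it always reads
-- a[-2], a[1] and up to a[n-1]), and A raises there too unless a data-dependent short-circuit
-- returns False before the out-of-range read, an accident of its evaluation order.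
def Pre_check (a : List Int) (n : Int) : Prop := 2 ≤ a.length ∧ n ≤ (a.length : Int)
instance (a : List Int) (n : Int) : Decidable (Pre_check a n) := by unfold Pre_check; infer_instance
def pvWitness_check : List Int × Int := ([1, 3, 2], 3)

def Spec_check (a : List Int) (n : Int) (out : Bool) : Prop := out = check_alt a n
instance (a : List Int) (n : Int) (out : Bool) : Decidable (Spec_check a n out) := by unfold Spec_check; infer_instance

-- ===== CLAIM (what is proved, stated in full; the proofs are below) =====
def Claim_equal_check : Prop := ∀ (a : List Int) (n : Int), Dom_check a n → Pre_check a n → Spec_check a n (check a n)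

-- ===== LEMMAS AND PROOFS =====

-- the sign stored for the pair (i-1, i), and the two wrap-around boundary signs
def G (a : List Int) (i : Int) : Int := sign (PySem.List.pyGetD a i 0 - PySem.List.pyGetD a (i - 1) 0)
def Tw (a : List Int) : Int := sign (PySem.List.pyGetD a (-1) 0 - PySem.List.pyGetD a (-2) 0)
def To (a : List Int) : Int := sign (PySem.List.pyGetD a 0 0 - PySem.List.pyGetD a (-1) 0)

-- canonical predicate both programs are reduced to: all consulted pair signs nonzero, alternating
def PP (a : List Int) (n : Int) : Prop :=
  (Tw a ≠ 0 ∧ To a ≠ 0 ∧ G a 1 ≠ 0 ∧ (∀ i : Int, 2 ≤ i → i < n → G a i ≠ 0)) ∧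
  (To a ≠ Tw a ∧ G a 1 ≠ To a ∧ (∀ i : Int, 2 ≤ i → i < n → G a i ≠ G a (i - 1)))

theorem pyGetD_cons_pos (x : Int) (xs : List Int) (i : Int) (d : Int) (h : 1 ≤ i) :
    PySem.List.pyGetD (x :: xs) i d = PySem.List.pyGetD xs (i - 1) d := by
  by_cases hlt : i < (xs.length : Int) + 1
  · rw [PySem.List.pyGetD_eq_getElem _ _ (by omega) (by simp; omega),
        PySem.List.pyGetD_eq_getElem _ _ (by omega) (by simp; omega)]
    have ht : i.toNat = (i - 1).toNat + 1 := by omega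
    simp only [ht, List.getElem_cons_succ]
  · rw [PySem.List.pyGetD_of_none, PySem.List.pyGetD_of_none]
    · rw [PySem.List.pyGet?_eq_none_iff]
      intro hr
      unfold PySem.Raise.InRange at hr
      omega
    · rw [PySem.List.pyGet?_eq_none_iff]
      intro hr
      unfold PySem.Raise.InRange at hr
      simp at hr
      omega

-- indexing into the mapped tail [f(i) for i in range(2, n)]
theorem pyGetD_map_range2 (f : Int → Int) (n j : Int) (h0 : 0 ≤ j) (hj : j < n - 2) :
    PySem.List.pyGetD ((PySem.List.pyRange 2 n 1).map f) j 0 = f (2 + j) := by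
  have hlen : ((PySem.List.pyRange 2 n 1).map f).length = (n - 2).toNat := by
    rw [List.length_map, PySem.List.length_pyRange_one]
  rw [PySem.List.pyGetD_eq_getElem _ _ h0 (by rw [hlen]; omega), List.getElem_map,
      PySem.List.getElem_pyRange_one]
  congr 1
  omega

theorem nz_general (e1 e2 e3 : Int) (f : Int → Int) (n : Int) :
    ((e1 :: e2 :: e3 :: (PySem.List.pyRange 2 n 1).map f).all (fun x => decide (x ≠ 0)) = true)
    ↔ (e1 ≠ 0 ∧ e2 ≠ 0 ∧ e3 ≠ 0 ∧ ∀ i : Int, 2 ≤ i → i < n → f i ≠ 0) := by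
  rw [List.all_eq_true]
  simp only [List.mem_cons, List.mem_map, PySem.List.mem_pyRange_one, decide_eq_true_iff]
  constructor
  · intro h
    exact ⟨h e1 (Or.inl rfl), h e2 (Or.inr (Or.inl rfl)), h e3 (Or.inr (Or.inr (Or.inl rfl))),
      fun i h2 hi => h _ (Or.inr (Or.inr (Or.inr ⟨i, ⟨h2, hi⟩, rfl⟩)))⟩
  · rintro ⟨h1, h2, h3, h4⟩ x (rfl | rfl | rfl | ⟨i, ⟨hi2, hin⟩, rfl⟩)
    · exact h1
    · exact h2
    · exact h3
    · exact h4 i hi2 hin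

-- adjacency over the whole list, with the third head element equal to f 1 so that the
-- junction pair is the i = 2 instance of the general clause
theorem adj_general (e1 e2 : Int) (f : Int → Int) (n : Int) :
    ((PySem.List.pyRange 1 (PySem.List.len (e1 :: e2 :: f 1 :: (PySem.List.pyRange 2 n 1).map f)) 1).all
      (fun i => decide (PySem.List.pyGetD (e1 :: e2 :: f 1 :: (PySem.List.pyRange 2 n 1).map f) i 0 ≠
                        PySem.List.pyGetD (e1 :: e2 :: f 1 :: (PySem.List.pyRange 2 n 1).map f) (i - 1) 0)) = true)
    ↔ (e2 ≠ e1 ∧ f 1 ≠ e2 ∧ ∀ i : Int, 2 ≤ i → i < n → f i ≠ f (i - 1)) := by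
  have hlen : PySem.List.len (e1 :: e2 :: f 1 :: (PySem.List.pyRange 2 n 1).map f) = (n - 2).toNat + 3 := by
    simp [PySem.List.len_eq, PySem.List.length_pyRange_one]
    omega
  -- s[k] = f (k - 1) for every index 2 ≤ k < len s
  have hget : ∀ k : Int, 2 ≤ k → k < (n - 2).toNat + 3 →
      PySem.List.pyGetD (e1 :: e2 :: f 1 :: (PySem.List.pyRange 2 n 1).map f) k 0 = f (k - 1) := by
    intro k h2 hk
    rw [pyGetD_cons_pos _ _ k _ (by omega), pyGetD_cons_pos _ _ (k - 1) _ (by omega)]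
    rcases eq_or_lt_of_le h2 with h' | h'
    · rw [← h']
      norm_num [PySem.List.pyGetD_zero_cons]
    · rw [pyGetD_cons_pos _ _ (k - 1 - 1) _ (by omega),
          pyGetD_map_range2 f n (k - 1 - 1 - 1) (by omega) (by omega)]
      congr 1
      ring
  rw [hlen, List.all_eq_true]
  constructor
  · intro h
    refine ⟨?_, ?_, ?_⟩
    · have h1 := h 1 (by rw [PySem.List.mem_pyRange_one]; omega)
      simp only [decide_eq_true_iff] at h1
      rw [show (1 : Int) - 1 = 0 by norm_num, pyGetD_cons_pos _ _ 1 _ (by norm_num),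
          show (1 : Int) - 1 = 0 by norm_num, PySem.List.pyGetD_zero_cons,
          PySem.List.pyGetD_zero_cons] at h1
      exact h1
    · have h2 := h 2 (by rw [PySem.List.mem_pyRange_one]; omega)
      simp only [decide_eq_true_iff] at h2
      rw [hget 2 (by omega) (by omega), show (2 : Int) - 1 = 1 by norm_num,
          pyGetD_cons_pos _ _ 1 _ (by norm_num), show (1 : Int) - 1 = 0 by norm_num,
          PySem.List.pyGetD_zero_cons] at h2
      exact h2
    · intro i h2 hi
      have h3 := h (i + 1) (by rw [PySem.List.mem_pyRange_one]; omega)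
      simp only [decide_eq_true_iff] at h3
      rw [hget (i + 1) (by omega) (by omega), show i + 1 - 1 = i by ring,
          hget i (by omega) (by omega)] at h3
      exact h3
  · rintro ⟨h1, h2, h3⟩ i hmem
    rw [PySem.List.mem_pyRange_one] at hmem
    simp only [decide_eq_true_iff]
    rcases lt_trichotomy i 2 with h' | h' | h'
    · have hi1 : i = 1 := by omega
      subst hi1
      rw [show (1 : Int) - 1 = 0 by norm_num, pyGetD_cons_pos _ _ 1 _ (by norm_num),
          show (1 : Int) - 1 = 0 by norm_num, PySem.List.pyGetD_zero_cons,
          PySem.List.pyGetD_zero_cons]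
      exact h1
    · subst h'
      rw [hget 2 (by omega) (by omega), show (2 : Int) - 1 = 1 by norm_num,
          pyGetD_cons_pos _ _ 1 _ (by norm_num), show (1 : Int) - 1 = 0 by norm_num,
          PySem.List.pyGetD_zero_cons]
      exact h2
    · rw [hget i (by omega) (by omega), hget (i - 1) (by omega) (by omega)]
      exact h3 (i - 1) (by omega) (by omega)

theorem b_iff (a : List Int) (n : Int) : check_alt a n = true ↔ PP a n := by
  unfold check_alt
  simp only [List.cons_append, List.nil_append, Bool.and_eq_true]
  rw [show sign (PySem.List.pyGetD a 1 0 - PySem.List.pyGetD a 0 0) = G a 1 from by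
        unfold G; norm_num,
      show (fun i => sign (PySem.List.pyGetD a i 0 - PySem.List.pyGetD a (i - 1) 0)) = G a from rfl]
  exact (and_congr (nz_general _ _ _ (G a) n) (adj_general _ _ (G a) n)).trans
    (by unfold PP Tw To; exact Iff.rfl)

theorem checkLoop_iff (a : List Int) (n : Int) :
    ∀ (k : Nat) (i0 : Int), n - 1 - i0 ≤ (k : Int) →
    (checkLoop a n i0 = true ↔ ∀ i : Int, i0 ≤ i → i < n - 1 →
      ((PySem.List.pyGetD a (i - 1) 0 > PySem.List.pyGetD a i 0 ∧
        PySem.List.pyGetD a i 0 < PySem.List.pyGetD a (i + 1) 0) ∨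
       (PySem.List.pyGetD a (i + 1) 0 < PySem.List.pyGetD a i 0 ∧
        PySem.List.pyGetD a i 0 > PySem.List.pyGetD a (i - 1) 0))) := by
  intro k
  induction k with
  | zero =>
    intro i0 hk
    rw [checkLoop.eq_def, dif_neg (by omega : ¬ i0 < n - 1)]
    constructor
    · intro _ i h1 h2
      exact absurd h2 (by omega)
    · intro _
      rfl
  | succ k ih =>
    intro i0 hk
    rw [checkLoop.eq_def]
    by_cases h : i0 < n - 1
    · rw [dif_pos h]
      have hrec := ih (i0 + 1) (by omega)
      split_ifs with hc
      · simp only [Bool.or_eq_true, Bool.and_eq_true, decide_eq_true_iff] at hc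
        rw [hrec]
        constructor
        · intro hl i h1 h2
          rcases eq_or_lt_of_le h1 with h' | h'
          · rw [← h']
            exact hc
          · exact hl i (by omega) h2
        · intro hall i h1 h2
          exact hall i (by omega) h2
      · simp only [Bool.or_eq_true, Bool.and_eq_true, decide_eq_true_iff] at hc
        constructor
        · intro hfalse
          exact absurd hfalse (by simp)
        · intro hall
          exact absurd (hall i0 (by omega) h) hc
    · rw [dif_neg h]
      constructor
      · intro _ i h1 h2
        exact absurd h2 (by omega)
      · intro _
        rfl

theorem a_iff (a : List Int) (n : Int) : check a n = true ↔ PP a n := by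
  unfold check
  constructor
  · intro h
    split_ifs at h with c1 c2 c3
    simp only [Bool.or_eq_true, Bool.and_eq_true, decide_eq_true_iff] at c2 c3
    have hloop : ∀ i : Int, 1 ≤ i → i < n - 1 →
        (PySem.List.pyGetD a (i - 1) 0 > PySem.List.pyGetD a i 0 ∧
         PySem.List.pyGetD a i 0 < PySem.List.pyGetD a (i + 1) 0) ∨
        (PySem.List.pyGetD a (i + 1) 0 < PySem.List.pyGetD a i 0 ∧
         PySem.List.pyGetD a i 0 > PySem.List.pyGetD a (i - 1) 0) :=
      (checkLoop_iff a n (n - 2).toNat 1 (by omega)).mp c1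
    refine ⟨⟨?_, ?_, ?_, ?_⟩, ?_, ?_, ?_⟩
    · simp only [Tw, sign]; norm_num; split_ifs <;> omega
    · simp only [To, sign]; norm_num; split_ifs <;> omega
    · simp only [G, sign]; norm_num; split_ifs <;> omega
    · intro i h2 hi
      have hz := hloop (i - 1) (by omega) (by omega)
      rw [show i - 1 + 1 = i by ring] at hz
      simp only [G, sign]
      split_ifs <;> omega
    · simp only [To, Tw, sign]; norm_num; split_ifs <;> omega
    · simp only [G, To, sign]; norm_num; split_ifs <;> omega
    · intro i h2 hi
      have hz := hloop (i - 1) (by omega) (by omega)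
      rw [show i - 1 + 1 = i by ring] at hz
      simp only [G, sign]
      split_ifs <;> omega
  · rintro ⟨⟨hT2, hT1, hG1, hG⟩, hA1, hA2, hA3⟩
    have hG1' := hG1
    simp only [Tw, To, G, sign] at hT2 hT1 hG1 hA1 hA2
    norm_num at hT2 hT1 hG1 hA1 hA2
    have c2 : ((decide (PySem.List.pyGetD a (-1) 0 < PySem.List.pyGetD a 0 0) &&
        decide (PySem.List.pyGetD a 0 0 > PySem.List.pyGetD a 1 0)) ||
       (decide (PySem.List.pyGetD a (-1) 0 > PySem.List.pyGetD a 0 0) &&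
        decide (PySem.List.pyGetD a 0 0 < PySem.List.pyGetD a 1 0))) = true := by
      simp only [Bool.or_eq_true, Bool.and_eq_true, decide_eq_true_iff]
      split_ifs at hT1 hG1 hA2 <;> omega
    have c3 : ((decide (PySem.List.pyGetD a (-2) 0 < PySem.List.pyGetD a (-1) 0) &&
          decide (PySem.List.pyGetD a (-1) 0 > PySem.List.pyGetD a 0 0)) ||
         (decide (PySem.List.pyGetD a (-2) 0 > PySem.List.pyGetD a (-1) 0) &&
          decide (PySem.List.pyGetD a (-1) 0 < PySem.List.pyGetD a 0 0))) = true := by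
      simp only [Bool.or_eq_true, Bool.and_eq_true, decide_eq_true_iff]
      split_ifs at hT2 hT1 hA1 <;> omega
    have c1 : checkLoop a n 1 = true := by
      rw [checkLoop_iff a n (n - 2).toNat 1 (by omega)]
      intro i hm1 hm2
      have hmem : 1 ≤ i ∧ i < n - 1 := ⟨hm1, hm2⟩
      have hgi : G a i ≠ 0 := by
        rcases eq_or_lt_of_le hmem.1 with h' | h'
        · rw [← h']; exact hG1'
        · exact hG i (by omega) (by omega)
      have hgi1 : G a (i + 1) ≠ 0 := hG (i + 1) (by omega) (by omega)
      have hne : G a (i + 1) ≠ G a (i + 1 - 1) := hA3 (i + 1) (by omega) (by omega)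
      simp only [G, sign] at hgi hgi1 hne
      rw [show i + 1 - 1 = i by ring] at hgi1 hne
      split_ifs at hgi hgi1 hne <;> omega
    rw [if_pos c1, if_pos c2, if_pos c3]

-- ===== VERDICT (by name: the statement is the Claim_ definition above) =====
theorem check_spec : Claim_equal_check := by
  intro a n _ _
  unfold Spec_check
  have hA := a_iff a n
  have hB := b_iff a n
  cases hca : check a n
  · cases hcb : check_alt a n
    · rfl
    · exact absurd (hA.mpr (hB.mp hcb)) (by rw [hca]; simp)
  · cases hcb : check_alt a n
    · exact absurd (hB.mpr (hA.mp hca)) (by rw [hcb]; simp)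
    · rfl
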